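-- pv_equiv track=rewrite | github.com/chiragjn/advent-of-code-solutions | 2019/solutions/day8_part2.py | solve
-- ===== SOURCE A (Python) =====
-- from typing import Iterable
--
-- def solve(input_iter: Iterable[str], width: int = 25, height: int = 6) -> str:
--     line = next(iter(input_iter)).strip()
--     bits = list(line)
--     bits_per_layer = width * height
--     image = [['2' for _ in range(width)] for __ in range(height)]
--     for l in range(0, len(bits), bits_per_layer):
--         layer_bits = bits[l:l + bits_per_layer]
--         for i in range(height):
--             for j in range(width):
--                 if image[i][j] == '2':
--                     image[i][j] = layer_bits[(i * width) + j]
--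
--     return '\n'.join([''.join(['.' if pixel == '1' else ' ' for pixel in image_row]) for image_row in image])
-- ===== SOURCE B (Python) =====
-- def solve(input_iter, width=25, height=6):
--     bits = next(iter(input_iter)).strip()
--     bits_per_layer = width * height
--
--     def pixel(idx):
--         ch = next((bits[k] for k in range(idx, len(bits), bits_per_layer) if bits[k] != '2'), '2')
--         return '.' if ch == '1' else ' '
--
--     return '\n'.join(
--         ''.join(pixel(r * width + j) for j in range(width)) for r in range(height))
-- ===== Notes on version B (the rewrite author's own statement) =====
-- stated objective: alternative
-- what changed: B decodes the image pixel-by-pixel, taking for each pixel index the first character != '2' along a strided scan bits[idx], bits[idx+bpl], ... and grouping the rendered pixels into rows, instead of A's layer-by-layer sweep that mutates a 2D grid; same O(len(bits)) cost.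
import Mathlib
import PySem

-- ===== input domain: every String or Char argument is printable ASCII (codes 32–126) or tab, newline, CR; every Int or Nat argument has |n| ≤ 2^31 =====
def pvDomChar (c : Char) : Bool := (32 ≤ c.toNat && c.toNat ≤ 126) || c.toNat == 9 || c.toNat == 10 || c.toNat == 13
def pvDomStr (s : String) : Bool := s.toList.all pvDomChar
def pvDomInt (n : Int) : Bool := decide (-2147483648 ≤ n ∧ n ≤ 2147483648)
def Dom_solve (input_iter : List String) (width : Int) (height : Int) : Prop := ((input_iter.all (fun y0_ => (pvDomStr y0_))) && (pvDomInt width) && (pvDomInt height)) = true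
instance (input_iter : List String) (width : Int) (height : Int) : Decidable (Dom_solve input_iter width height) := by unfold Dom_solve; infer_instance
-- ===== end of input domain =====

-- B decodes the image pixel-by-pixel (first non-'2' along a strided scan of the flat string)
-- instead of A's layer-by-layer mutation of a 2D grid; objective: alternative decomposition, same cost.

-- ===== PORT A =====
-- one `image[i][j]` step of A's innermost loop body
def pixStep (lb : List Char) (w : Int) (i : Int) (img : List (List Char)) (j : Int) : List (List Char) :=
  if PySem.List.pyGetD (PySem.List.pyGetD img i []) j ' ' == '2' then
    PySem.List.pySetD img i
      (PySem.List.pySetD (PySem.List.pyGetD img i []) j (PySem.List.pyGetD lb (i * w + j) '2'))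
  else img

-- `for j in range(width): …`
def rowPass (lb : List Char) (w : Int) (img : List (List Char)) (i : Int) : List (List Char) :=
  (PySem.List.pyRange 0 w 1).foldl (pixStep lb w i) img

-- `layer_bits = bits[l:l+bits_per_layer]; for i in range(height): …`
def layerPass (bits : List Char) (bpl : Int) (w : Int) (h : Int)
    (img : List (List Char)) (l : Int) : List (List Char) :=
  (PySem.List.pyRange 0 h 1).foldl
    (rowPass (PySem.List.slice bits (some l) (some (l + bpl))) w) img

def solve (input_iter : List String) (width : Int) (height : Int) : String :=
  match input_iter with
  | [] => ""   -- next(iter([])) raises StopIteration; excluded by Pre_solve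
  | s :: _ =>
    let bits := (PySem.Str.strip s).toList
    let bpl := width * height
    let image0 := (PySem.List.pyRange 0 height 1).map
      (fun _ => (PySem.List.pyRange 0 width 1).map (fun _ => '2'))
    let image := (PySem.List.pyRange 0 (bits.length : Int) bpl).foldl
      (layerPass bits bpl width height) image0
    PySem.Str.join "\n"
      (image.map (fun row => String.ofList (row.map (fun p => if p == '1' then '.' else ' '))))

-- ===== PORT B =====
-- first character ≠ '2' along bits[idx], bits[idx+bpl], …, rendered as '.'/' '
def firstPix (bits : List Char) (bpl : Int) (idx : Int) : Char :=
  match (PySem.List.pyRange idx (bits.length : Int) bpl).find?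
      (fun k => PySem.List.pyGetD bits k '2' != '2') with
  | some k => if PySem.List.pyGetD bits k '2' == '1' then '.' else ' '
  | none => ' '

def solve_alt (input_iter : List String) (width : Int) (height : Int) : String :=
  match input_iter with
  | [] => ""   -- next(iter([])) raises StopIteration; excluded by Pre_solve
  | s :: _ =>
    let bits := (PySem.Str.strip s).toList
    let bpl := width * height
    PySem.Str.join "\n"
      ((PySem.List.pyRange 0 height 1).map (fun r =>
        String.ofList ((PySem.List.pyRange 0 width 1).map (fun j => firstPix bits bpl (r * width + j)))))

-- ===== PRECONDITION & SPEC =====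
-- Pre_solve excludes exactly the inputs where the Python A raises: an empty iterator
-- (StopIteration), width*height = 0 (range step 0, ValueError), and data whose final
-- partial layer leaves some pixel unresolved after all full layers (IndexError).
def Pre_solve (input_iter : List String) (width : Int) (height : Int) : Prop :=
  input_iter ≠ [] ∧
  width * height ≠ 0 ∧
  (0 < width → 0 < height →
    (let bits := (PySem.Str.strip (input_iter.headD "")).toList
     let B := (width * height).toNat
     bits.length % B = 0 ∨
       (1 ≤ bits.length / B ∧
        ∀ idx < B, bits.length % B ≤ idx →
          ∃ k < bits.length / B, bits.getD (k * B + idx) '2' ≠ '2')))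
instance (input_iter : List String) (width : Int) (height : Int) : Decidable (Pre_solve input_iter width height) := by unfold Pre_solve; infer_instance
def pvWitness_solve : List String × Int × Int := (["10"], 1, 2)

def Spec_solve (input_iter : List String) (width : Int) (height : Int) (out : String) : Prop := out = solve_alt input_iter width height
instance (input_iter : List String) (width : Int) (height : Int) (out : String) : Decidable (Spec_solve input_iter width height out) := by unfold Spec_solve; infer_instance

-- ===== CLAIM (what is proved, stated in full; the proofs are below) =====
def Claim_equal_solve : Prop := ∀ (input_iter : List String) (width : Int) (height : Int), Dom_solve input_iter width height → Pre_solve input_iter width height → Spec_solve input_iter width height (solve input_iter width height)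
-- ===== LEMMAS AND PROOFS =====

def updG (lb : List Char) (g : Int → Char) : Int → Char :=
  fun idx => if g idx = '2' then PySem.List.pyGetD lb idx '2' else g idx

-- A's image mid-sweep: rows < b (and row b up to column a) already updated to g₁, rest still g₂

def midGrid (w h : Int) (g₁ g₂ : Int → Char) (b a : Int) : List (List Char) :=
  (PySem.List.pyRange 0 h 1).map (fun i => (PySem.List.pyRange 0 w 1).map (fun j =>
    if i < b ∨ (i = b ∧ j < a) then g₁ (i * w + j) else g₂ (i * w + j)))

def firstNon2 (xs : List Char) : Char := ((xs.find? (· != '2')).getD '2')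

lemma map_pyRange_congr {α : Type} (n : Int) (F G : Int → α)
    (h : ∀ i, 0 ≤ i → i < n → F i = G i) :
    (PySem.List.pyRange 0 n 1).map F = (PySem.List.pyRange 0 n 1).map G := by
  apply List.map_congr_left
  intro i hi
  rcases PySem.List.mem_pyRange_one.1 hi with ⟨h1, h2⟩
  exact h i h1 h2

lemma set_map_pyRange {α : Type} (n : Int) (F : Int → α) (b : Int)
    (hb0 : 0 ≤ b) (hbn : b < n) (v : α) :
    ((PySem.List.pyRange 0 n 1).map F).set b.toNat v
      = (PySem.List.pyRange 0 n 1).map (fun i => if i = b then v else F i) := by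
  apply List.ext_getElem (by simp)
  intro k h1 h2
  rw [List.getElem_set]
  simp only [List.getElem_map, PySem.List.getElem_pyRange_one]
  by_cases hk : b.toNat = k
  · subst hk
    have hbk : (0 : Int) + ((b.toNat : Nat) : Int) = b := by omega
    rw [if_pos rfl, hbk, if_pos rfl]
  · have hne : ¬ ((0 : Int) + (k : Int) = b) := by omega
    rw [if_neg hk, if_neg hne]

lemma pyGetD_midGrid (w h : Int) (g₁ g₂ : Int → Char) (b a : Int)
    (hb0 : 0 ≤ b) (hbh : b < h) :
    PySem.List.pyGetD (midGrid w h g₁ g₂ b a) b []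
      = (PySem.List.pyRange 0 w 1).map (fun j =>
          if b < b ∨ (b = b ∧ j < a) then g₁ (b * w + j) else g₂ (b * w + j)) := by
  unfold midGrid
  exact PySem.List.pyGetD_map_pyRange_of_nonneg _ h b [] hb0 hbh

lemma pyRange_pos_nil (a b s : Int) (hs : 0 < s) (hab : b ≤ a) :
    PySem.List.pyRange a b s = [] := by
  unfold PySem.List.pyRange
  rw [if_neg (by omega)]
  simp only [if_pos hs, if_neg (by omega : ¬ a < b)]
  simp

lemma pyRange_nonpos_nil (b s : Int) (hb : 0 ≤ b) (hs : s ≤ 0) :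
    PySem.List.pyRange 0 b s = [] := by
  unfold PySem.List.pyRange
  by_cases h0 : s = 0
  · rw [if_pos h0]
  · rw [if_neg h0]
    simp only [if_neg (by omega : ¬ 0 < s), if_neg (by omega : ¬ b < 0)]
    simp

lemma pyRange_pos_cons (a b s : Int) (hs : 0 < s) (hab : a < b) :
    PySem.List.pyRange a b s = a :: PySem.List.pyRange (a + s) b s := by
  rw [PySem.List.pyRange_of_pos _ _ hs, PySem.List.pyRange_of_pos _ _ hs]
  rw [if_pos hab]
  have key : ((b - a + s - 1) / s).toNat
      = (if a + s < b then ((b - (a + s) + s - 1) / s).toNat else 0) + 1 := by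
    have h1 : b - a + s - 1 = (b - a - 1) + 1 * s := by ring
    have h2 : (b - a + s - 1) / s = (b - a - 1) / s + 1 := by
      rw [h1, Int.add_mul_ediv_right _ _ (by omega)]
    by_cases hc : a + s < b
    · rw [if_pos hc]
      have h3 : b - (a + s) + s - 1 = b - a - 1 := by ring
      rw [h3, h2]
      have : 0 ≤ (b - a - 1) / s := Int.ediv_nonneg (by omega) (by omega)
      omega
    · rw [if_neg hc]
      have h4 : (b - a - 1) / s = 0 := by
        apply Int.ediv_eq_zero_of_lt (by omega) (by omega)
      rw [h2, h4]
      rfl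
  rw [key, List.range_succ_eq_map]
  simp only [List.map_cons, List.map_map, Function.comp_def, Nat.cast_zero, mul_zero, add_zero]
  congr 1
  apply List.map_congr_left
  intro k _
  push_cast
  ring

lemma jloop (lb : List Char) (w h : Int) (g : Int → Char) (b : Int)
    (hb0 : 0 ≤ b) (hbh : b < h) :
    ∀ n a, 0 ≤ a → (w - a).toNat = n →
    (PySem.List.pyRange a w 1).foldl (pixStep lb w b) (midGrid w h (updG lb g) g b a)
      = midGrid w h (updG lb g) g b w := by
  intro n
  induction n with
  | zero =>
      intro a ha0 hm
      rw [PySem.List.pyRange_one_eq_nil (by omega)]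
      unfold midGrid
      apply map_pyRange_congr
      intro i hi0 hih
      apply map_pyRange_congr
      intro j hj0 hjw
      have : (i = b ∧ j < a) ↔ (i = b ∧ j < w) := by constructor <;> (rintro ⟨h1,h2⟩; exact ⟨h1, by omega⟩)
      by_cases hc : i < b ∨ (i = b ∧ j < a)
      · rw [if_pos hc, if_pos (by tauto)]
      · rw [if_neg hc, if_neg (by tauto)]
  | succ n ihn =>
      intro a ha0 hm
      have haw : a < w := by omega
      rw [PySem.List.pyRange_one_cons haw, List.foldl_cons]
      have hstep : pixStep lb w b (midGrid w h (updG lb g) g b a) a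
          = midGrid w h (updG lb g) g b (a + 1) := by
        unfold pixStep
        rw [pyGetD_midGrid w h _ _ b a hb0 hbh]
        rw [PySem.List.pyGetD_map_pyRange_of_nonneg _ w a ' ' ha0 haw]
        have hcond : ¬ (b < b ∨ (b = b ∧ a < a)) := by omega
        rw [if_neg hcond]
        by_cases hg : g (b * w + a) = '2'
        · have hbeq : (g (b * w + a) == '2') = true := by simp [hg]
          rw [if_pos hbeq]
          rw [PySem.List.pySetD_of_nonneg _ _ ha0, PySem.List.pySetD_of_nonneg _ _ hb0]
          rw [set_map_pyRange w _ a ha0 haw]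
          unfold midGrid
          rw [set_map_pyRange h _ b hb0 hbh]
          apply map_pyRange_congr
          intro i hi0 hih
          by_cases hib : i = b
          · rw [if_pos hib, hib]
            apply map_pyRange_congr
            intro j hj0 hjw
            by_cases hja : j = a
            · rw [if_pos hja, hja]
              rw [if_pos (by omega : b < b ∨ (b = b ∧ a < a + 1))]
              simp only [updG, if_pos hg]
            · rw [if_neg hja]
              have hcond2 : ¬ (b < b ∨ (b = b ∧ a < a)) := by omega
              by_cases hjlt : j < a
              · rw [if_pos (by tauto : b < b ∨ (b = b ∧ j < a)), if_pos (by omega : b < b ∨ (b = b ∧ j < a + 1))]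
              · rw [if_neg (by omega : ¬ (b < b ∨ (b = b ∧ j < a))), if_neg (by omega : ¬ (b < b ∨ (b = b ∧ j < a + 1)))]
          · rw [if_neg hib]
            apply map_pyRange_congr
            intro j hj0 hjw
            by_cases hc : i < b
            · rw [if_pos (Or.inl hc), if_pos (Or.inl hc)]
            · rw [if_neg (by tauto : ¬ (i < b ∨ (i = b ∧ j < a))), if_neg (by tauto : ¬ (i < b ∨ (i = b ∧ j < a + 1)))]
        · have hbeq : (g (b * w + a) == '2') = false := by simp [hg]
          rw [hbeq]
          simp only [Bool.false_eq_true, if_false]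
          unfold midGrid
          apply map_pyRange_congr
          intro i hi0 hih
          apply map_pyRange_congr
          intro j hj0 hjw
          by_cases hc : i < b ∨ (i = b ∧ j < a)
          · rw [if_pos hc, if_pos (by omega : i < b ∨ (i = b ∧ j < a + 1))]
          · by_cases hc2 : i = b ∧ j = a
            · rw [if_neg hc, if_pos (by omega : i < b ∨ (i = b ∧ j < a + 1))]
              rcases hc2 with ⟨hib, hja⟩
              rw [hib, hja]
              simp only [updG, if_neg hg]
            · rw [if_neg hc, if_neg (by omega : ¬ (i < b ∨ (i = b ∧ j < a + 1)))]
      rw [hstep]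
      exact ihn (a + 1) (by omega) (by omega)

lemma iloop (lb : List Char) (w h : Int) (g : Int → Char) :
    ∀ n b, 0 ≤ b → (h - b).toNat = n →
    (PySem.List.pyRange b h 1).foldl (rowPass lb w) (midGrid w h (updG lb g) g b 0)
      = midGrid w h (updG lb g) g h 0 := by
  intro n
  induction n with
  | zero =>
      intro b hb0 hm
      rw [PySem.List.pyRange_one_eq_nil (by omega)]
      unfold midGrid
      apply map_pyRange_congr
      intro i hi0 hih
      apply map_pyRange_congr
      intro j hj0 hjw
      rw [if_pos (by omega : i < b ∨ (i = b ∧ j < 0)), if_pos (by omega : i < h ∨ (i = h ∧ j < 0))]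
  | succ n ihn =>
      intro b hb0 hm
      have hbh : b < h := by omega
      rw [PySem.List.pyRange_one_cons hbh, List.foldl_cons]
      have hrow : rowPass lb w (midGrid w h (updG lb g) g b 0) b
          = midGrid w h (updG lb g) g (b + 1) 0 := by
        unfold rowPass
        by_cases hw : 0 < w
        · rw [jloop lb w h g b hb0 hbh (w - 0).toNat 0 le_rfl rfl]
          unfold midGrid
          apply map_pyRange_congr
          intro i hi0 hih
          apply map_pyRange_congr
          intro j hj0 hjw
          by_cases hc : i < b + 1
          · rw [if_pos (by omega : i < b ∨ (i = b ∧ j < w)), if_pos (by omega : i < b + 1 ∨ (i = b + 1 ∧ j < 0))]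
          · rw [if_neg (by omega : ¬ (i < b ∨ (i = b ∧ j < w))), if_neg (by omega : ¬ (i < b + 1 ∨ (i = b + 1 ∧ j < 0)))]
        · rw [PySem.List.pyRange_one_eq_nil (by omega : w ≤ 0)]
          unfold midGrid
          apply map_pyRange_congr
          intro i hi0 hih
          apply map_pyRange_congr
          intro j hj0 hjw
          omega
      rw [hrow]
      exact ihn (b + 1) (by omega) (by omega)

lemma layerPass_grid (bits : List Char) (bpl w h : Int) (g : Int → Char) (l : Int) :
    layerPass bits bpl w h (midGrid w h g g 0 0) l
      = midGrid w h (updG (PySem.List.slice bits (some l) (some (l + bpl))) g)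
          (updG (PySem.List.slice bits (some l) (some (l + bpl))) g) 0 0 := by
  unfold layerPass
  have h1 : midGrid w h g g 0 0
      = midGrid w h (updG (PySem.List.slice bits (some l) (some (l + bpl))) g) g 0 0 := by
    unfold midGrid
    apply map_pyRange_congr
    intro i hi0 hih
    apply map_pyRange_congr
    intro j hj0 hjw
    rw [if_neg (by omega : ¬ (i < 0 ∨ (i = 0 ∧ j < 0))), if_neg (by omega : ¬ (i < 0 ∨ (i = 0 ∧ j < 0)))]
  rw [h1, iloop _ w h g (h - 0).toNat 0 le_rfl rfl]
  unfold midGrid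
  apply map_pyRange_congr
  intro i hi0 hih
  apply map_pyRange_congr
  intro j hj0 hjw
  rw [if_pos (Or.inl hih)]
  rw [if_neg (by omega : ¬ (i < 0 ∨ (i = 0 ∧ j < 0)))]

lemma layersFold (bits : List Char) (bpl w h : Int) :
    ∀ (L : List Int) (g : Int → Char),
    L.foldl (layerPass bits bpl w h) (midGrid w h g g 0 0)
      = midGrid w h
          (L.foldl (fun g' l => updG (PySem.List.slice bits (some l) (some (l + bpl))) g') g)
          (L.foldl (fun g' l => updG (PySem.List.slice bits (some l) (some (l + bpl))) g') g) 0 0 := by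
  intro L
  induction L with
  | nil => intro g; rfl
  | cons l L ih =>
      intro g
      simp only [List.foldl_cons, layerPass_grid]
      exact ih _

lemma firstNon2_cons (c : Char) (xs : List Char) :
    firstNon2 (c :: xs) = if c = '2' then firstNon2 xs else c := by
  by_cases h : c = '2'
  · simp [firstNon2, List.find?, h]
  · have hb : (c != '2') = true := by simp [h]
    simp [firstNon2, List.find?, hb, h]

lemma chainVal (bits : List Char) (bpl : Int) :
    ∀ (L : List Int) (g : Int → Char) (idx : Int),
    (L.foldl (fun g' l => updG (PySem.List.slice bits (some l) (some (l + bpl))) g') g) idx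
      = if g idx = '2'
        then firstNon2 (L.map (fun l => PySem.List.pyGetD (PySem.List.slice bits (some l) (some (l + bpl))) idx '2'))
        else g idx := by
  intro L
  induction L with
  | nil => intro g idx; by_cases h : g idx = '2' <;> simp [firstNon2, h]
  | cons l L ih =>
      intro g idx
      simp only [List.foldl_cons, List.map_cons, firstNon2_cons]
      rw [ih]
      by_cases h : g idx = '2'
      · simp only [updG, h, if_true]
      · simp only [updG, if_neg h]

lemma sliceVal (bits : List Char) (bpl l idx : Int)
    (hl : 0 ≤ l) (h0 : 0 ≤ idx) (hlt : idx < bpl) :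
    PySem.List.pyGetD (PySem.List.slice bits (some l) (some (l + bpl))) idx '2'
      = PySem.List.pyGetD bits (l + idx) '2' := by
  rw [PySem.List.slice_toNat bits hl (by omega)]
  rw [PySem.List.pyGetD_of_nonneg _ _ h0, PySem.List.pyGetD_of_nonneg _ _ (by omega)]
  have h1 : idx.toNat < (l + bpl).toNat - l.toNat := by omega
  have h2 : (l + idx).toNat = l.toNat + idx.toNat := by omega
  rw [h2]
  rcases Nat.lt_or_ge (l.toNat + idx.toNat) bits.length with h | h
  · rw [List.getD_eq_getElem _ _ (by simp only [List.length_take, List.length_drop]; omega)]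
    rw [List.getD_eq_getElem _ _ (by omega)]
    rw [List.getElem_take, List.getElem_drop]
  · rw [List.getD_eq_default _ _ (by simp only [List.length_take, List.length_drop]; omega),
        List.getD_eq_default _ _ (by omega)]

lemma stride (bits : List Char) (bpl idx : Int) (h0 : 0 ≤ idx) (hlt : idx < bpl) :
    ∀ m l, 0 ≤ l → ((bits.length : Int) - l).toNat = m →
    firstNon2 ((PySem.List.pyRange l (bits.length : Int) bpl).map
        (fun l' => PySem.List.pyGetD bits (l' + idx) '2'))
      = firstNon2 ((PySem.List.pyRange (l + idx) (bits.length : Int) bpl).map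
        (fun k => PySem.List.pyGetD bits k '2')) := by
  have hbpl : 0 < bpl := by omega
  intro m
  induction m using Nat.strong_induction_on with
  | _ m ih =>
    intro l hl hm
    by_cases hln : l < (bits.length : Int)
    · rw [pyRange_pos_cons _ _ _ hbpl hln]
      have ihm : ∀ l', l' = l + bpl → firstNon2 ((PySem.List.pyRange l' (bits.length : Int) bpl).map
            (fun l'' => PySem.List.pyGetD bits (l'' + idx) '2'))
          = firstNon2 ((PySem.List.pyRange (l' + idx) (bits.length : Int) bpl).map
            (fun k => PySem.List.pyGetD bits k '2')) := by
        intro l' hl'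
        exact ih ((bits.length : Int) - l').toNat (by omega) l' (by omega) rfl
      by_cases hk : l + idx < (bits.length : Int)
      · rw [pyRange_pos_cons _ _ _ hbpl hk]
        simp only [List.map_cons, firstNon2_cons]
        by_cases hv : PySem.List.pyGetD bits (l + idx) '2' = '2'
        · rw [if_pos hv, if_pos hv]
          rw [ihm (l + bpl) rfl]
          have : l + bpl + idx = l + idx + bpl := by ring
          rw [this]
        · rw [if_neg hv, if_neg hv]
      · have hnil : PySem.List.pyRange (l + idx) (bits.length : Int) bpl = [] :=
          pyRange_pos_nil _ _ _ hbpl (by omega)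
        rw [hnil]
        simp only [List.map_cons, firstNon2_cons]
        have hv : PySem.List.pyGetD bits (l + idx) '2' = '2' := by
          rw [PySem.List.pyGetD_of_nonneg _ _ (by omega)]
          exact List.getD_eq_default _ _ (by omega)
        rw [if_pos hv, ihm (l + bpl) rfl]
        have hnil2 : PySem.List.pyRange (l + bpl + idx) (bits.length : Int) bpl = [] :=
          pyRange_pos_nil _ _ _ hbpl (by omega)
        rw [hnil2]
    · rw [pyRange_pos_nil _ _ _ hbpl (by omega), pyRange_pos_nil _ _ _ hbpl (by omega)]
      rfl

lemma pixelEq (bits : List Char) (w h : Int) (hw : 0 < w) (hh : 0 < h)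
    (idx : Int) (h0 : 0 ≤ idx) (hlt : idx < w * h) :
    (if ((PySem.List.pyRange 0 (bits.length : Int) (w * h)).foldl
          (fun g' l => updG (PySem.List.slice bits (some l) (some (l + w * h))) g') (fun _ => '2')) idx == '1'
       then '.' else ' ')
      = firstPix bits (w * h) idx := by
  have hbpl : 0 < w * h := by positivity
  rw [chainVal bits (w * h) _ _ idx, if_pos rfl]
  have hcong : (PySem.List.pyRange 0 (bits.length : Int) (w * h)).map
        (fun l => PySem.List.pyGetD (PySem.List.slice bits (some l) (some (l + w * h))) idx '2')
      = (PySem.List.pyRange 0 (bits.length : Int) (w * h)).map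
        (fun l => PySem.List.pyGetD bits (l + idx) '2') := by
    apply List.map_congr_left
    intro l hl
    rcases (PySem.List.mem_pyRange_iff_of_pos hbpl l).1 hl with ⟨h1, h2, h3⟩
    exact sliceVal bits (w * h) l idx h1 h0 hlt
  rw [hcong]
  rw [stride bits (w * h) idx h0 hlt (bits.length : Int).toNat 0 le_rfl (by omega)]
  rw [zero_add]
  unfold firstPix firstNon2
  rw [List.find?_map]
  have hpred : ((· != '2') ∘ (fun k => PySem.List.pyGetD bits k '2'))
      = (fun k => PySem.List.pyGetD bits k '2' != '2') := rfl
  rw [hpred]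
  cases hf : (PySem.List.pyRange idx (bits.length : Int) (w * h)).find?
      (fun k => PySem.List.pyGetD bits k '2' != '2') with
  | none => simp
  | some k => simp

lemma foldl_fixed_id {α β : Type} (L : List β) (x : α) :
    L.foldl (fun a _ => a) x = x := by
  induction L generalizing x with
  | nil => rfl
  | cons _ _ ih => exact ih x

-- ===== VERDICT (by name: the statement is the Claim_ definition above) =====
theorem solve_spec : Claim_equal_solve := by
  intro input_iter width height _ hpre
  unfold Spec_solve
  obtain ⟨hne, hnz, -⟩ := hpre
  cases input_iter with
  | nil => exact absurd rfl hne
  | cons s rest =>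
    simp only [solve, solve_alt]
    by_cases hh : height ≤ 0
    · -- no rows at all: both sides join an empty list of rows
      rw [PySem.List.pyRange_one_eq_nil hh]
      have hid : ∀ (img : List (List Char)) l,
          layerPass (PySem.Str.strip s).toList (width * height) width height img l = img := by
        intro img l
        unfold layerPass
        rw [PySem.List.pyRange_one_eq_nil hh]
        rfl
      rw [List.foldl_ext _ (fun (a : List (List Char)) (_ : Int) => a) _
        (fun a l _ => hid a l)]
      rw [foldl_fixed_id]
      simp
    · by_cases hw : width ≤ 0
      · -- width ≤ 0 < height: every row is empty on both sides
        have hbpl : width * height ≤ 0 := by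
          rcases lt_or_eq_of_le hw with hlt | heq
          · exact le_of_lt (mul_neg_of_neg_of_pos hlt (by omega))
          · rw [heq]; simp
        rw [pyRange_nonpos_nil _ _ (by omega) hbpl]
        rw [PySem.List.pyRange_one_eq_nil hw]
        simp only [List.foldl_nil, List.map_nil]
        congr 1
        rw [List.map_map]
        apply map_pyRange_congr
        intro i hi0 hih
        simp
      · -- main case: 0 < width, 0 < height
        have hw' : 0 < width := by omega
        have hh' : 0 < height := by omega
        have h0 : (PySem.List.pyRange 0 height 1).map
              (fun _ => (PySem.List.pyRange 0 width 1).map (fun _ => '2'))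
            = midGrid width height (fun _ => '2') (fun _ => '2') 0 0 := by
          unfold midGrid
          apply map_pyRange_congr
          intro i hi0 hih
          apply map_pyRange_congr
          intro j hj0 hjw
          rw [ite_self]
        rw [h0, layersFold]
        congr 1
        unfold midGrid
        rw [List.map_map]
        apply map_pyRange_congr
        intro i hi0 hih
        simp only [Function.comp]
        congr 1
        rw [List.map_map]
        apply map_pyRange_congr
        intro j hj0 hjw
        simp only [Function.comp, ite_self]
        have hiw : 0 ≤ i * width := mul_nonneg hi0 (le_of_lt hw')
        have hidxlt : i * width + j < width * height := by
          calc i * width + j < i * width + width := by omega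
          _ = (i + 1) * width := by ring
          _ ≤ height * width := mul_le_mul_of_nonneg_right (by omega) (by omega)
          _ = width * height := by ring
        exact pixelEq (PySem.Str.strip s).toList width height hw' hh' (i * width + j)
          (by omega) hidxlt
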